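-- pv_equiv track=rewrite | github.com/hekunlie/astrophy-research | mylib/tool_box.py | alloc
-- ===== SOURCE A (Python) =====
-- def alloc(alloc_list, portions, method="mean"):
--     """
--     alloc the "target mission list" to CPUs
--     :param alloc_list: list of any thing
--     :param portions: INT, the number of sub-list
--     :return: list of some sub-list
--     """
--     num = len(alloc_list)
--     m, n = divmod(num, portions)
--     pool = []
--     for i in range(portions):
--         temp = []
--         for j in range(m*i, m*(i+1)):
--             temp.append(alloc_list[j])
--         pool.append(temp)
--     # the rest < portions
--     if n > 0:
--         if method == "mean":
--             for i in range(n):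
--                 pool[i].append(alloc_list[m*portions+i])
--         else:
--             pool[-1].extend(alloc_list[m*portions:m*portions+n])
--     return pool
-- ===== SOURCE B (Python) =====
-- def alloc(alloc_list, portions, method="mean"):
--     """Each portion computed directly by slicing, in one list comprehension."""
--     m = len(alloc_list) // portions
--     mp = m * portions
--     if method == "mean":
--         return [alloc_list[m*i:m*(i+1)] + alloc_list[mp+i:mp+i+1]
--                 for i in range(portions)]
--     return [alloc_list[m*i:m*(i+1)] + (alloc_list[mp:] if i == portions - 1 else [])
--             for i in range(portions)]
-- ===== Notes on version B (the rewrite author's own statement) =====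
-- stated objective: simpler
-- what changed: Replaces A's imperative three-phase build (nested append loops building chunks, then a separate mutating remainder pass) with a single list comprehension that computes each portion directly by slicing.
import Mathlib
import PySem

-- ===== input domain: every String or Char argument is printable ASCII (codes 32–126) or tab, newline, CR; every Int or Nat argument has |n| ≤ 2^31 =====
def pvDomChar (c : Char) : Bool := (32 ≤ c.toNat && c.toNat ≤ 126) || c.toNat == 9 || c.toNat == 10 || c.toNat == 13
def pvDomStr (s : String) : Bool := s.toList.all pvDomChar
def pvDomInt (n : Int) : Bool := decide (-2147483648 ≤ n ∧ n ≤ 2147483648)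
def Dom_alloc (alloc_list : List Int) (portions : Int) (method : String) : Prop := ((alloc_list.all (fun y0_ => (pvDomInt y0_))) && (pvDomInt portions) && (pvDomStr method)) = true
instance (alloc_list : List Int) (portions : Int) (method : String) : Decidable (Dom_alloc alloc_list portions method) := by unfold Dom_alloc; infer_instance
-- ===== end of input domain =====

-- B builds each portion directly by slicing in one comprehension instead of A's
-- nested append loops plus a mutating remainder pass; same cost, simpler.

-- ===== PORT A =====
def alloc (alloc_list : List Int) (portions : Int) (method : String) : List (List Int) :=
  let num : Int := PySem.List.len alloc_list
  match PySem.Int.divmod? num portions with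
  | none => []   -- ZeroDivisionError (portions = 0), excluded by Pre_alloc
  | some (m, n) =>
    let pool : List (List Int) :=
      (PySem.List.pyRange 0 portions).foldl (fun pool i =>
        let temp : List Int :=
          (PySem.List.pyRange (m * i) (m * (i + 1))).foldl (fun temp j =>
            temp ++ [PySem.List.pyGetD alloc_list j 0]) []   -- index always in range here
        pool ++ [temp]) []
    if n > 0 then
      if method == "mean" then
        (PySem.List.pyRange 0 n).foldl (fun pool i =>
          -- pool[i].append(alloc_list[m*portions+i]); 0 ≤ i < n so toNat is exact
          pool.modify i.toNat (fun t => t ++ [PySem.List.pyGetD alloc_list (m * portions + i) 0])) pool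
      else
        -- pool[-1].extend(alloc_list[m*portions : m*portions+n]); pool is nonempty since n > 0 forces portions > 0
        pool.modify (pool.length - 1)
          (fun t => t ++ PySem.List.slice alloc_list (some (m * portions)) (some (m * portions + n)))
    else pool

-- ===== PORT B =====
def alloc_alt (alloc_list : List Int) (portions : Int) (method : String) : List (List Int) :=
  match PySem.Int.floordiv? (PySem.List.len alloc_list) portions with
  | none => []   -- ZeroDivisionError (portions = 0), excluded by Pre_alloc
  | some m =>
    let mp : Int := m * portions
    if method == "mean" then
      (PySem.List.pyRange 0 portions).map (fun i =>
        PySem.List.slice alloc_list (some (m * i)) (some (m * (i + 1))) ++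
        PySem.List.slice alloc_list (some (mp + i)) (some (mp + i + 1)))
    else
      (PySem.List.pyRange 0 portions).map (fun i =>
        PySem.List.slice alloc_list (some (m * i)) (some (m * (i + 1))) ++
        (if i == portions - 1 then PySem.List.slice alloc_list (some mp) none else []))

-- ===== PRECONDITION & SPEC =====
-- Pre_ excludes only portions = 0, where Python's divmod (A) and // (B) raise ZeroDivisionError.
def Pre_alloc (alloc_list : List Int) (portions : Int) (method : String) : Prop := portions ≠ 0
instance (alloc_list : List Int) (portions : Int) (method : String) : Decidable (Pre_alloc alloc_list portions method) := by unfold Pre_alloc; infer_instance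
def pvWitness_alloc : List Int × Int × String := ([1, 2, 3, 4, 5], 2, "mean")

def Spec_alloc (alloc_list : List Int) (portions : Int) (method : String) (out : List (List Int)) : Prop := out = alloc_alt alloc_list portions method
instance (alloc_list : List Int) (portions : Int) (method : String) (out : List (List Int)) : Decidable (Spec_alloc alloc_list portions method out) := by unfold Spec_alloc; infer_instance

-- ===== CLAIM (what is proved, stated in full; the proofs are below) =====
def Claim_equal_alloc : Prop := ∀ (alloc_list : List Int) (portions : Int) (method : String), Dom_alloc alloc_list portions method → Pre_alloc alloc_list portions method → Spec_alloc alloc_list portions method (alloc alloc_list portions method)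

-- ===== LEMMAS AND PROOFS =====

theorem pyRange_eq_nil {a b : Int} (h : b ≤ a) : PySem.List.pyRange a b = [] := by
  simp [PySem.List.pyRange]; omega

theorem len_pyRange (a b : Int) : (PySem.List.pyRange a b).length = (b - a).toNat := by
  simp [PySem.List.pyRange]; omega

theorem getElem_pyRange (a b : Int) (k : Nat) (h : k < (PySem.List.pyRange a b).length) :
    (PySem.List.pyRange a b)[k] = a + k := by
  simp [PySem.List.pyRange]

-- a chunk built by indexing equals the corresponding slice
theorem map_pyGetD_pyRange_eq_slice (xs : List Int) (a b : Int)
    (ha : 0 ≤ a) (hab : a ≤ b) (hb : b ≤ xs.length) :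
    (PySem.List.pyRange a b).map (fun j => PySem.List.pyGetD xs j 0) =
      PySem.List.slice xs (some a) (some b) := by
  rw [PySem.List.slice_toNat xs ha (le_trans ha hab)]
  apply List.ext_getElem
  · simp [len_pyRange]; omega
  · intro k h1 h2
    have hk : (k : Int) < b - a := by have := len_pyRange a b; simp [this] at h1; omega
    simp only [List.getElem_map, getElem_pyRange]
    rw [PySem.List.pyGetD_eq_getElem xs 0 (by omega) (by omega)]
    rw [List.getElem_take, List.getElem_drop]
    congr 1
    omega

-- a one-element slice, in range / past the end
theorem slice_one_lt (xs : List Int) (q : Int) (hq : 0 ≤ q) (h : q < xs.length) :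
    PySem.List.slice xs (some q) (some (q + 1)) = [xs[q.toNat]] := by
  rw [PySem.List.slice_toNat xs hq (by omega)]
  have h1 : (q + 1).toNat - q.toNat = 1 := by omega
  rw [h1, List.drop_eq_getElem_cons (by omega : q.toNat < xs.length)]
  rfl

theorem slice_one_ge (xs : List Int) (q : Int) (h : (xs.length : Int) ≤ q) :
    PySem.List.slice xs (some q) (some (q + 1)) = [] := by
  rw [PySem.List.slice_toNat xs (by omega) (by omega)]
  have : List.drop q.toNat xs = [] := List.drop_eq_nil_of_le (by omega)
  simp [this]

-- the "mean" remainder pass: c modifies at indices 0..c-1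
theorem foldl_modify_pyRange (c : Nat) (g : Int → List Int) (pool : List (List Int)) :
    (PySem.List.pyRange 0 (c : Int)).foldl
        (fun pl i => pl.modify i.toNat (fun t => t ++ g i)) pool
      = pool.mapIdx (fun idx t => if idx < c then t ++ g idx else t) := by
  induction c generalizing pool with
  | zero =>
    rw [pyRange_eq_nil (by omega)]
    apply List.ext_getElem <;> simp
  | succ c ih =>
    rw [show ((c + 1 : Nat) : Int) = (c : Int) + 1 by push_cast; ring]
    rw [PySem.List.pyRange_one_succ_right (by omega)]
    rw [List.foldl_append]
    rw [ih]
    simp only [List.foldl_cons, List.foldl_nil, Int.toNat_natCast]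
    apply List.ext_getElem
    · simp
    · intro k h1 h2
      rw [List.getElem_modify]
      simp only [List.getElem_mapIdx]
      by_cases hk : c = k
      · subst hk
        simp
      · simp only [List.length_modify, List.length_mapIdx] at h1
        by_cases hlt : k < c
        · simp [hk, hlt, Nat.lt_succ_of_lt hlt]
        · have : ¬ k < c + 1 := by omega
          simp [hk, hlt, this]

theorem alloc_eq_alt (alloc_list : List Int) (portions : Int) (method : String)
    (hp : portions ≠ 0) :
    alloc alloc_list portions method = alloc_alt alloc_list portions method := by
  rcases lt_or_gt_of_ne hp with hneg | hpos
  · -- portions < 0: both sides are []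
    unfold alloc alloc_alt
    simp only [PySem.Int.divmod?, PySem.Int.floordiv?, hp]
    rw [pyRange_eq_nil (by omega : portions ≤ 0)]
    have hn : ¬ ((PySem.List.len alloc_list).fmod portions > 0) :=
      not_lt.mpr (PySem.Int.mod_neg_bounds (PySem.List.len alloc_list) hneg).2
    simp only [List.foldl_nil, List.map_nil, ite_false]
    rw [if_neg hn]
    split <;> rfl
  · -- portions > 0
    unfold alloc alloc_alt
    simp only [PySem.Int.divmod?, PySem.Int.floordiv?, hp]
    set L : Int := PySem.List.len alloc_list with hL
    set m : Int := L.fdiv portions with hm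
    set n : Int := L.fmod portions with hn
    have hLlen : L = (alloc_list.length : Int) := by simp [hL, PySem.List.len]
    have hLnn : 0 ≤ L := by omega
    have hmn : m * portions + n = L := PySem.Int.floordiv_mul_add_mod L portions
    have hn0 : 0 ≤ n := PySem.Int.mod_nonneg L hpos
    have hnp : n < portions := PySem.Int.mod_lt L hpos
    have hm0 : 0 ≤ m := by nlinarith
    have hmp0 : 0 ≤ m * portions := by positivity
    have hmpL : m * portions ≤ L := by omega
    -- phase 1 pool as a map of chunks
    simp only [PySem.List.foldl_append_singleton_eq_map, List.nil_append, if_false]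
    have hchunk_slice : ∀ i : Int, 0 ≤ i → i + 1 ≤ portions →
        (PySem.List.pyRange (m * i) (m * (i + 1))).map (fun j => PySem.List.pyGetD alloc_list j 0)
          = PySem.List.slice alloc_list (some (m * i)) (some (m * (i + 1))) := by
      intro i h0 h1
      apply map_pyGetD_pyRange_eq_slice
      · positivity
      · nlinarith
      · nlinarith
    by_cases hmeth : (method == "mean") = true
    · -- method == "mean"
      simp only [hmeth, if_true]
      by_cases hn1 : n > 0
      · rw [if_pos hn1]
        rw [show n = ((n.toNat : Nat) : Int) from by omega]
        rw [foldl_modify_pyRange n.toNat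
          (fun i => [PySem.List.pyGetD alloc_list (m * portions + i) 0])]
        apply List.ext_getElem
        · simp [len_pyRange]
        · intro k h1 h2
          have hk : k < portions.toNat := by simpa [len_pyRange] using h2
          simp only [List.getElem_mapIdx, List.getElem_map, getElem_pyRange, zero_add]
          rw [hchunk_slice (k : Int) (by omega) (by omega)]
          by_cases hkn : k < n.toNat
          · rw [if_pos hkn,
              slice_one_lt alloc_list (m * portions + (k : Int)) (by omega) (by omega),
              PySem.List.pyGetD_eq_getElem alloc_list 0 (by omega) (by omega)]
          · rw [if_neg hkn,
              slice_one_ge alloc_list (m * portions + (k : Int)) (by omega), List.append_nil]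
      · rw [if_neg hn1]
        have hnz : n = 0 := by omega
        apply List.ext_getElem
        · simp [len_pyRange]
        · intro k h1 h2
          have hk : k < portions.toNat := by simpa [len_pyRange] using h1
          simp only [List.getElem_map, getElem_pyRange, zero_add]
          rw [hchunk_slice (k : Int) (by omega) (by omega),
            slice_one_ge alloc_list (m * portions + (k : Int)) (by omega), List.append_nil]
    · -- other method
      simp only [Bool.not_eq_true] at hmeth
      simp only [hmeth, Bool.false_eq_true, if_false]
      have htail : PySem.List.slice alloc_list (some (m * portions)) none
          = List.drop (m * portions).toNat alloc_list := PySem.List.slice_from alloc_list hmp0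
      by_cases hn1 : n > 0
      · rw [if_pos hn1]
        have hslice : PySem.List.slice alloc_list (some (m * portions)) (some (m * portions + n))
            = List.drop (m * portions).toNat alloc_list := by
          rw [PySem.List.slice_toNat alloc_list hmp0 (by omega)]
          apply List.take_of_length_le
          simp
          omega
        apply List.ext_getElem
        · simp [len_pyRange]
        · intro k h1 h2
          have hk : k < portions.toNat := by simpa [len_pyRange] using h2
          rw [List.getElem_modify]
          simp only [List.getElem_map, getElem_pyRange, zero_add, List.length_map, len_pyRange]
          rw [hchunk_slice (k : Int) (by omega) (by omega), htail, hslice]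
          by_cases hlast : (portions - 0).toNat - 1 = k
          · rw [if_pos hlast]
            have : ((k : Int) == portions - 1) = true := by
              rw [beq_iff_eq]; omega
            rw [this, if_pos rfl]
          · rw [if_neg hlast]
            have : ((k : Int) == portions - 1) = false := by
              rw [beq_eq_false_iff_ne]; omega
            rw [this]
            simp
      · rw [if_neg hn1]
        have hnz : n = 0 := by omega
        have hdrop : List.drop (m * portions).toNat alloc_list = [] :=
          List.drop_eq_nil_of_le (by omega)
        apply List.ext_getElem
        · simp [len_pyRange]
        · intro k h1 h2
          have hk : k < portions.toNat := by simpa [len_pyRange] using h1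
          simp only [List.getElem_map, getElem_pyRange, zero_add]
          rw [hchunk_slice (k : Int) (by omega) (by omega), htail, hdrop]
          simp

-- ===== VERDICT (by name: the statement is the Claim_ definition above) =====
theorem alloc_spec : Claim_equal_alloc := by
  intro alloc_list portions method _ hpre
  exact alloc_eq_alt alloc_list portions method hpre
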